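-- pv_equiv track=rewrite | github.com/marchese29/HubitatAutomationMCP | room_manager.py | get_all_child_rooms
-- ===== SOURCE A (Python) =====
-- def get_all_child_rooms(
--     room_name: str, adjacency: dict[str, list[str]]
-- ) -> set[str]:
--     """Recursively get all child room names for a given room."""
--     all_children = set()
--
--     def collect_children(current_room: str):
--         children = adjacency.get(current_room, [])
--         for child in children:
--             if child not in all_children:  # Prevent infinite loops
--                 all_children.add(child)
--                 collect_children(child)
--
--     collect_children(room_name)
--     return all_children
-- ===== SOURCE B (Python) =====
-- def get_all_child_rooms(
--     room_name: str, adjacency: dict[str, list[str]]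
-- ) -> set[str]:
--     """Iterative worklist: one pop-and-expand step applied until the pending
--     list is empty; no recursion, no closure over the result set."""
--     result = set()
--     pending = list(adjacency.get(room_name, []))
--     while pending:
--         node, pending = pending[0], pending[1:]
--         if node in result:
--             continue
--         result.add(node)
--         pending = list(adjacency.get(node, [])) + pending
--     return result
-- ===== Notes on version B (the rewrite author's own statement) =====
-- stated objective: alternative
-- what changed: Replaces A's recursive nested helper (a closure mutating the set) by a flat worklist loop: a single pop-and-expand step on a (pending, result) state pair applied until the pending list empties; in the Lean port B is the bounded iteration of this step function, while A is a fuel recursion over child lists.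
import Mathlib
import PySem

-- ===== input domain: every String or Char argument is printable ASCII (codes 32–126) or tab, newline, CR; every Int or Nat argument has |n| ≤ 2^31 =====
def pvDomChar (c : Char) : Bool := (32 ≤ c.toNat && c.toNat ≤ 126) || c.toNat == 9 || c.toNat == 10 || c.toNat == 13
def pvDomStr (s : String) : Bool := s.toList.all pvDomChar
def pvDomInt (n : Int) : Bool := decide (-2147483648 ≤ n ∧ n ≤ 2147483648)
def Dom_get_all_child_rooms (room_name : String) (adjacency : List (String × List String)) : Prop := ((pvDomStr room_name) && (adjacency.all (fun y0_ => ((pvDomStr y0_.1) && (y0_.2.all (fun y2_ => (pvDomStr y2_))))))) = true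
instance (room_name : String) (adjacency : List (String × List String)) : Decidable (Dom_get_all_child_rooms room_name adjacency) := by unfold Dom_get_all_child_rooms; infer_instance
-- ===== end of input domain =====

-- B replaces A's recursive nested helper by a flat worklist loop (one pop-and-expand
-- step iterated until the pending list empties); alternative decomposition, same cost;
-- equivalence is about the returned set (built in the same discovery order).

-- ===== PORT A =====
-- adjacency.get(c, [])
def pvChildren (adjacency : List (String × List String)) (c : String) : List String :=
  (PySem.Dict.mk adjacency).getD c []

-- all strings occurring as children anywhere in the adjacency dict (fuel bound only)
def pvVals (adjacency : List (String × List String)) : List String :=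
  adjacency.flatMap (fun p => p.2)

-- totality fuel for A's recursion; proved sufficient below, so A's value never depends on it
def pvFuel (adjacency : List (String × List String)) : Nat :=
  (pvVals adjacency).length * ((pvVals adjacency).length + 2) + 1

-- A's nested collect_children: the for-loop over `children = adjacency.get(current, [])`,
-- recursing into each child not yet in the set; fuel only makes the recursion total
def aCollect (adjacency : List (String × List String)) :
    Nat → List String → PySem.Set String → PySem.Set String
  | _, [], s => s
  | 0, _ :: _, s => s
  | fuel + 1, c :: rest, s =>
    if PySem.Set.contains s c = true then aCollect adjacency fuel rest s
    else aCollect adjacency fuel rest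
      (aCollect adjacency fuel (pvChildren adjacency c) (PySem.Set.add s c))

def get_all_child_rooms (room_name : String) (adjacency : List (String × List String)) : List String :=
  aCollect adjacency (pvFuel adjacency) (pvChildren adjacency room_name) PySem.Set.empty

-- ===== PORT B =====
-- adjacency.get(node, []) on B's side: first-match association-list lookup
def bGet (adjacency : List (String × List String)) (node : String) : List String :=
  (List.lookup node adjacency).getD []

-- one more than the total number of child entries; (bSize)^2 bounds B's loop iterations
def bSize (adjacency : List (String × List String)) : Nat :=
  adjacency.foldr (fun p acc => p.2.length + acc) 0 + 1

-- one iteration of B's while-loop body on the (pending, result) state;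
-- the empty-pending state is a fixed point, so iterating a proven-sufficient
-- number of times computes exactly the loop's final state
def bStep (adjacency : List (String × List String)) :
    List String × PySem.Set String → List String × PySem.Set String
  | ([], s) => ([], s)
  | (node :: pending, s) =>
    if PySem.Set.contains s node = true then (pending, s)
    else (bGet adjacency node ++ pending, PySem.Set.add s node)

def get_all_child_rooms_alt (room_name : String) (adjacency : List (String × List String)) : List String :=
  ((bStep adjacency)^[bSize adjacency * bSize adjacency]
    (bGet adjacency room_name, PySem.Set.empty)).2

-- ===== PRECONDITION & SPEC =====
def Spec_get_all_child_rooms (room_name : String) (adjacency : List (String × List String)) (out : List String) : Prop := out = get_all_child_rooms_alt room_name adjacency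
instance (room_name : String) (adjacency : List (String × List String)) (out : List String) : Decidable (Spec_get_all_child_rooms room_name adjacency out) := by unfold Spec_get_all_child_rooms; infer_instance

-- ===== CLAIM (what is proved, stated in full; the proofs are below) =====
def Claim_equal_get_all_child_rooms : Prop := ∀ (room_name : String) (adjacency : List (String × List String)), Dom_get_all_child_rooms room_name adjacency → Spec_get_all_child_rooms room_name adjacency (get_all_child_rooms room_name adjacency)

-- ===== LEMMAS AND PROOFS =====

-- proof-side rendering of B's loop as a fuel recursion (bridged to bStep-iteration below)
def bLoop (adjacency : List (String × List String)) :
    Nat → List String → PySem.Set String → PySem.Set String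
  | _, [], s => s
  | 0, _ :: _, s => s
  | fuel + 1, node :: stack, s =>
    if PySem.Set.contains s node = true then bLoop adjacency fuel stack s
    else bLoop adjacency fuel (pvChildren adjacency node ++ stack) (PySem.Set.add s node)

-- number of child-strings not yet in the visited set, and the fuel bound of a state
def uCnt (adjacency : List (String × List String)) (s : PySem.Set String) : Nat :=
  ((pvVals adjacency).filter (fun v => !(PySem.Set.contains s v))).length

def bnd (adjacency : List (String × List String)) (s : PySem.Set String) (cs : List String) : Nat :=
  cs.length + uCnt adjacency s * ((pvVals adjacency).length + 1)

lemma pvChildren_cons (p : String × List String) (r : List (String × List String)) (c : String) :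
    pvChildren (p :: r) c = if p.1 == c then p.2 else pvChildren r c := by
  obtain ⟨k, v⟩ := p
  simp only [pvChildren, PySem.Dict.getD_eq_get?_getD, PySem.Dict.get?_mk_cons]
  split <;> rfl

lemma bGet_eq (adjacency : List (String × List String)) (c : String) :
    bGet adjacency c = pvChildren adjacency c := by
  induction adjacency with
  | nil => rfl
  | cons p r ih =>
    obtain ⟨k, v⟩ := p
    rw [pvChildren_cons]
    simp only [bGet, List.lookup] at ih ⊢
    by_cases h : k = c
    · subst h; simp
    · have h1 : (k == c) = false := by simp [h]
      have h2 : (c == k) = false := beq_eq_false_iff_ne.mpr (fun e => h e.symm)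
      simp [h1, h2, ih]

lemma bSize_eq (adjacency : List (String × List String)) :
    bSize adjacency = (pvVals adjacency).length + 1 := by
  induction adjacency with
  | nil => rfl
  | cons p r ih =>
    simp only [bSize, List.foldr, pvVals, List.flatMap_cons, List.length_append] at ih ⊢
    omega

lemma iterate_bStep_eq_bLoop (adjacency : List (String × List String)) :
    ∀ (n : Nat) (stack : List String) (s : PySem.Set String),
      ((bStep adjacency)^[n] (stack, s)).2 = bLoop adjacency n stack s := by
  intro n
  induction n with
  | zero => intro stack s; cases stack <;> rfl
  | succ m ih =>
    intro stack s
    rw [Function.iterate_succ_apply]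
    cases stack with
    | nil =>
      have h : bStep adjacency ([], s) = ([], s) := rfl
      rw [h, ih]
      cases m <;> rfl
    | cons node rest =>
      simp only [bStep, bLoop]
      split
      · exact ih rest s
      · rw [bGet_eq]; exact ih _ _

lemma pvVals_cons (p : String × List String) (r : List (String × List String)) :
    pvVals (p :: r) = p.2 ++ pvVals r := by
  simp [pvVals]

lemma mem_pvChildren {adjacency : List (String × List String)} {c x : String}
    (hx : x ∈ pvChildren adjacency c) : x ∈ pvVals adjacency := by
  induction adjacency with
  | nil =>
    have h0 : pvChildren [] c = [] := rfl
    rw [h0] at hx; cases hx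
  | cons p r ih =>
    rw [pvChildren_cons] at hx
    rw [pvVals_cons, List.mem_append]
    split at hx
    · exact Or.inl hx
    · exact Or.inr (ih hx)

lemma len_pvChildren (adjacency : List (String × List String)) (c : String) :
    (pvChildren adjacency c).length ≤ (pvVals adjacency).length := by
  induction adjacency with
  | nil =>
    have : pvChildren [] c = [] := rfl
    simp [this]
  | cons p r ih =>
    rw [pvChildren_cons, pvVals_cons]
    rw [List.length_append]
    split <;> omega

lemma uCnt_le (adjacency : List (String × List String)) (s : PySem.Set String) :
    uCnt adjacency s ≤ (pvVals adjacency).length :=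
  List.length_filter_le _ _

lemma not_contains_iff (s : PySem.Set String) (a : String) :
    ((!PySem.Set.contains s a) = true) ↔ a ∉ s := by
  simp [PySem.Set.contains]

lemma uCnt_mono (adjacency : List (String × List String)) {s t : PySem.Set String}
    (h : ∀ x ∈ s, x ∈ t) : uCnt adjacency t ≤ uCnt adjacency s := by
  refine (List.monotone_filter_right _ ?_).length_le
  intro a ha
  exact (not_contains_iff s a).mpr (fun hm => (not_contains_iff t a).mp ha (h a hm))

lemma filter_len_succ_le {l : List String} {p q : String → Bool}
    (himp : ∀ a, q a = true → p a = true) {c : String} (hc : c ∈ l)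
    (hqc : q c = false) (hpc : p c = true) :
    (l.filter q).length + 1 ≤ (l.filter p).length := by
  induction l with
  | nil => cases hc
  | cons a t ih =>
    have hmono := (List.monotone_filter_right t himp).length_le
    rcases List.mem_cons.mp hc with h | h
    · subst h
      simp [hqc, hpc]
      omega
    · have hih := ih h
      rcases Bool.eq_false_or_eq_true (q a) with hqa | hqa
      · have hpa := himp a hqa
        simp [hqa, hpa]
        omega
      · rcases Bool.eq_false_or_eq_true (p a) with hpa | hpa
        · simp [hqa, hpa]
          omega
        · simp [hqa, hpa]
          omega

lemma uCnt_add_lt (adjacency : List (String × List String)) {s : PySem.Set String} {c : String}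
    (hc : c ∈ pvVals adjacency) (hn : c ∉ s) :
    uCnt adjacency (PySem.Set.add s c) + 1 ≤ uCnt adjacency s := by
  refine filter_len_succ_le ?_ hc ?_ ?_
  · intro a ha
    exact (not_contains_iff s a).mpr
      (fun hm => (not_contains_iff _ a).mp ha ((PySem.Set.mem_add s c a).mpr (Or.inl hm)))
  · have : ¬ ((!PySem.Set.contains (PySem.Set.add s c) c) = true) :=
      fun h => (not_contains_iff _ c).mp h ((PySem.Set.mem_add s c c).mpr (Or.inr rfl))
    exact Bool.not_eq_true _ ▸ Bool.of_not_eq_true this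
  · exact (not_contains_iff s c).mpr hn

lemma aCollect_mono (adjacency : List (String × List String)) :
    ∀ (fuel : Nat) (cs : List String) (s : PySem.Set String) (x : String),
      x ∈ s → x ∈ aCollect adjacency fuel cs s := by
  intro fuel
  induction fuel with
  | zero => intro cs s x hx; cases cs <;> simpa [aCollect] using hx
  | succ f ih =>
    intro cs s x hx
    cases cs with
    | nil => simpa [aCollect] using hx
    | cons c rest =>
      simp only [aCollect]
      split
      · exact ih rest s x hx
      · exact ih rest _ x (ih (pvChildren adjacency c) _ x ((PySem.Set.mem_add _ _ _).mpr (Or.inl hx)))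

lemma mul_step (u' u K : Nat) (h : u' + 1 ≤ u) : u' * (K + 1) + (K + 1) ≤ u * (K + 1) := by
  calc u' * (K + 1) + (K + 1) = (u' + 1) * (K + 1) := by ring
    _ ≤ u * (K + 1) := Nat.mul_le_mul_right _ h

lemma bLoop_succ (adjacency : List (String × List String)) :
    ∀ (fuel : Nat) (cs : List String) (s : PySem.Set String),
      (∀ x ∈ cs, x ∈ pvVals adjacency) → bnd adjacency s cs < fuel →
      bLoop adjacency fuel cs s = bLoop adjacency (fuel + 1) cs s := by
  intro fuel
  induction fuel with
  | zero => intro cs s _ hb; exact absurd hb (Nat.not_lt_zero _)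
  | succ f ih =>
    intro cs s hcs hb
    cases cs with
    | nil => rfl
    | cons c rest =>
      have hrest : ∀ x ∈ rest, x ∈ pvVals adjacency := fun x hx => hcs x (List.mem_cons_of_mem _ hx)
      simp only [bLoop]
      split
      · exact ih rest s hrest (by simp only [bnd, List.length_cons] at hb ⊢; omega)
      · rename_i h
        have hcV : c ∈ pvVals adjacency := hcs c List.mem_cons_self
        have hcns : c ∉ s := fun hm => by
          rw [(PySem.Set.contains_iff s c).mpr hm] at h; exact h rfl
        have hu := uCnt_add_lt adjacency hcV hcns
        have hchlen := len_pvChildren adjacency c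
        have hmul := mul_step (uCnt adjacency (PySem.Set.add s c)) (uCnt adjacency s)
          (pvVals adjacency).length hu
        refine ih _ _ (fun x hx => ?_) ?_
        · rcases List.mem_append.mp hx with h' | h'
          · exact mem_pvChildren h'
          · exact hrest x h'
        · simp only [bnd, List.length_cons, List.length_append] at hb ⊢; omega

lemma bLoop_ge (adjacency : List (String × List String)) (fuel : Nat) (cs : List String)
    (s : PySem.Set String) (hcs : ∀ x ∈ cs, x ∈ pvVals adjacency)
    (hb : bnd adjacency s cs < fuel) :
    ∀ k, bLoop adjacency fuel cs s = bLoop adjacency (fuel + k) cs s := by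
  intro k
  induction k with
  | zero => rfl
  | succ j ihj =>
    rw [ihj, bLoop_succ adjacency (fuel + j) cs s hcs (by omega)]
    rfl

lemma bLoop_irrel (adjacency : List (String × List String)) {f1 f2 : Nat} {cs : List String}
    {s : PySem.Set String} (hcs : ∀ x ∈ cs, x ∈ pvVals adjacency)
    (h1 : bnd adjacency s cs < f1) (h2 : bnd adjacency s cs < f2) :
    bLoop adjacency f1 cs s = bLoop adjacency f2 cs s := by
  rcases le_total f1 f2 with h | h
  · obtain ⟨k, rfl⟩ := Nat.le.dest h
    exact bLoop_ge adjacency f1 cs s hcs h1 k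
  · obtain ⟨k, rfl⟩ := Nat.le.dest h
    exact (bLoop_ge adjacency f2 cs s hcs h2 k).symm

lemma bLoop_nil (adjacency : List (String × List String)) (fuel : Nat) (s : PySem.Set String) :
    bLoop adjacency fuel [] s = s := by
  cases fuel <;> rfl

lemma main_eq (adjacency : List (String × List String)) :
    ∀ (fA : Nat) (cs rest : List String) (s : PySem.Set String) (fB fB' : Nat),
      (∀ x ∈ cs, x ∈ pvVals adjacency) → (∀ x ∈ rest, x ∈ pvVals adjacency) →
      bnd adjacency s cs < fA → bnd adjacency s (cs ++ rest) < fB →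
      bnd adjacency (aCollect adjacency fA cs s) rest < fB' →
      bLoop adjacency fB (cs ++ rest) s = bLoop adjacency fB' rest (aCollect adjacency fA cs s) := by
  intro fA
  induction fA with
  | zero => intro cs rest s fB fB' _ _ hb1 _ _; exact absurd hb1 (Nat.not_lt_zero _)
  | succ f ih =>
    intro cs rest s fB fB' hcs hrest hb1 hb2 hb3
    cases cs with
    | nil =>
      have hA : aCollect adjacency (f + 1) [] s = s := rfl
      rw [hA] at hb3 ⊢
      rw [List.nil_append] at hb2 ⊢
      exact bLoop_irrel adjacency hrest hb2 hb3
    | cons c cs' =>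
      cases fB with
      | zero => exact absurd hb2 (Nat.not_lt_zero _)
      | succ g =>
        have hcs' : ∀ x ∈ cs', x ∈ pvVals adjacency := fun x hx => hcs x (List.mem_cons_of_mem _ hx)
        have hcr : ∀ x ∈ cs' ++ rest, x ∈ pvVals adjacency := by
          intro x hx
          rcases List.mem_append.mp hx with h' | h'
          · exact hcs' x h'
          · exact hrest x h'
        rcases Bool.eq_false_or_eq_true (PySem.Set.contains s c) with h | h
        · -- c already visited: both sides skip it
          have hredA : aCollect adjacency (f + 1) (c :: cs') s = aCollect adjacency f cs' s := by
            simp only [aCollect]; rw [if_pos h]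
          have hstepB : bLoop adjacency (g + 1) (c :: (cs' ++ rest)) s
              = bLoop adjacency g (cs' ++ rest) s := by
            simp only [bLoop]; rw [if_pos h]
          rw [hredA] at hb3
          rw [List.cons_append, hstepB, hredA]
          exact ih cs' rest s g fB' hcs' hrest
            (by simp only [bnd, List.length_cons] at hb1 ⊢; omega)
            (by simp only [bnd, List.length_cons, List.length_append] at hb2 ⊢; omega)
            hb3
        · -- c not yet visited
          have hcV : c ∈ pvVals adjacency := hcs c List.mem_cons_self
          have hcns : c ∉ s := fun hm => by
            rw [(PySem.Set.contains_iff s c).mpr hm] at h; cases h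
          have hu := uCnt_add_lt adjacency hcV hcns
          have hchlen := len_pvChildren adjacency c
          have hmul := mul_step (uCnt adjacency (PySem.Set.add s c)) (uCnt adjacency s)
            (pvVals adjacency).length hu
          have hredA : aCollect adjacency (f + 1) (c :: cs') s
              = aCollect adjacency f cs'
                  (aCollect adjacency f (pvChildren adjacency c) (PySem.Set.add s c)) := by
            simp only [aCollect]; rw [if_neg (fun hc => hcns ((PySem.Set.contains_iff s c).mp hc))]
          have hstepB : bLoop adjacency (g + 1) (c :: (cs' ++ rest)) s
              = bLoop adjacency g (pvChildren adjacency c ++ (cs' ++ rest)) (PySem.Set.add s c) := by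
            simp only [bLoop]; rw [if_neg (fun hc => hcns ((PySem.Set.contains_iff s c).mp hc))]
          have hch : ∀ x ∈ pvChildren adjacency c, x ∈ pvVals adjacency :=
            fun x hx => mem_pvChildren hx
          -- state after A finishes the subtree of c
          have hmX : ∀ x ∈ PySem.Set.add s c,
              x ∈ aCollect adjacency f (pvChildren adjacency c) (PySem.Set.add s c) :=
            fun x hx => aCollect_mono adjacency f _ _ x hx
          have huX := uCnt_mono adjacency hmX
          have hmul2 := Nat.mul_le_mul_right ((pvVals adjacency).length + 1) huX
          have hbin : bnd adjacency (PySem.Set.add s c) (pvChildren adjacency c) < f := by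
            simp only [bnd, List.length_cons] at hb1 ⊢; omega
          have hbB : bnd adjacency (PySem.Set.add s c)
              (pvChildren adjacency c ++ (cs' ++ rest)) < g := by
            simp only [bnd, List.length_cons, List.length_append] at hb2 ⊢; omega
          have hbM : bnd adjacency
              (aCollect adjacency f (pvChildren adjacency c) (PySem.Set.add s c))
              (cs' ++ rest)
              < bnd adjacency
                  (aCollect adjacency f (pvChildren adjacency c) (PySem.Set.add s c))
                  (cs' ++ rest) + 1 := Nat.lt_succ_self _
          have ih1 := ih (pvChildren adjacency c) (cs' ++ rest) (PySem.Set.add s c) g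
            (bnd adjacency (aCollect adjacency f (pvChildren adjacency c) (PySem.Set.add s c))
              (cs' ++ rest) + 1)
            hch hcr hbin hbB hbM
          have hbX : bnd adjacency
              (aCollect adjacency f (pvChildren adjacency c) (PySem.Set.add s c)) cs' < f := by
            simp only [bnd, List.length_cons] at hb1 ⊢; omega
          rw [hredA] at hb3
          have ih2 := ih cs' rest
            (aCollect adjacency f (pvChildren adjacency c) (PySem.Set.add s c))
            (bnd adjacency (aCollect adjacency f (pvChildren adjacency c) (PySem.Set.add s c))
              (cs' ++ rest) + 1)
            fB' hcs' hrest hbX hbM hb3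
          rw [List.cons_append, hstepB, hredA]
          exact ih1.trans ih2

lemma uCnt_empty (adjacency : List (String × List String)) :
    uCnt adjacency PySem.Set.empty = (pvVals adjacency).length := by
  simp [uCnt, PySem.Set.empty, PySem.Set.contains]

-- ===== VERDICT (by name: the statement is the Claim_ definition above) =====
theorem get_all_child_rooms_spec : Claim_equal_get_all_child_rooms := by
  intro room_name adjacency _
  unfold Spec_get_all_child_rooms get_all_child_rooms get_all_child_rooms_alt
  rw [iterate_bStep_eq_bLoop, bGet_eq, bSize_eq]
  have hch : ∀ x ∈ pvChildren adjacency room_name, x ∈ pvVals adjacency :=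
    fun x hx => mem_pvChildren hx
  have hfuel : pvFuel adjacency
      = (pvVals adjacency).length * ((pvVals adjacency).length + 1)
        + (pvVals adjacency).length + 1 := by
    unfold pvFuel; ring
  have hchlen := len_pvChildren adjacency room_name
  have hb1 : bnd adjacency PySem.Set.empty (pvChildren adjacency room_name) < pvFuel adjacency := by
    simp only [bnd, uCnt_empty]; omega
  have hbB : bnd adjacency PySem.Set.empty (pvChildren adjacency room_name)
      < ((pvVals adjacency).length + 1) * ((pvVals adjacency).length + 1) := by
    simp only [bnd, uCnt_empty]; nlinarith
  have huX := uCnt_le adjacency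
    (aCollect adjacency (pvFuel adjacency) (pvChildren adjacency room_name) PySem.Set.empty)
  have hmul := Nat.mul_le_mul_right ((pvVals adjacency).length + 1) huX
  have hb3 : bnd adjacency
      (aCollect adjacency (pvFuel adjacency) (pvChildren adjacency room_name) PySem.Set.empty)
      ([] : List String) < pvFuel adjacency := by
    simp only [bnd, List.length_nil]; omega
  have h := main_eq adjacency (pvFuel adjacency) (pvChildren adjacency room_name) []
    PySem.Set.empty (((pvVals adjacency).length + 1) * ((pvVals adjacency).length + 1))
    (pvFuel adjacency) hch (by intro x hx; cases hx)
    hb1 (by rwa [List.append_nil]) hb3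
  rw [List.append_nil, bLoop_nil] at h
  exact h.symm
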